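-- pv_equiv track=rewrite | github.com/benjamin1108/cnetspy | src/storage/file_storage.py | generate_update_markdown
-- ===== SOURCE A (Python) =====
-- def generate_update_markdown(
--     title: str,
--     publish_date: str,
--     vendor: str,
--     source_type: str,
--     source_url: str,
--     content: str,
--     product_name: str = '',
--     update_type: str = '',
--     doc_links: list = None
-- ) -> str:
--     """
--     生成标准化的更新Markdown内容
--     """
--     lines = [
--         f"# {title}",
--         "",
--         f"**发布时间:** {publish_date}",
--         "",
--         f"**厂商:** {vendor.upper()}",
--         "",
--     ]
--
--     if product_name:
--         lines.extend([f"**产品:** {product_name}", ""])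
--
--     if update_type:
--         lines.extend([f"**类型:** {update_type}", ""])
--     else:
--         lines.extend([f"**类型:** {source_type.upper()}", ""])
--
--     lines.extend([
--         f"**原始链接:** {source_url}",
--         "",
--         "---",
--         "",
--         content
--     ])
--
--     if doc_links:
--         lines.extend(["", "## 相关文档", ""])
--         for doc_link in doc_links:
--             text = doc_link.get('text', 'Link')
--             url = doc_link.get('url', '')
--             lines.append(f"- [{text}]({url})")
--
--     return "\n".join(lines)
-- ===== SOURCE B (Python) =====
-- def generate_update_markdown(
--     title: str,
--     publish_date: str,
--     vendor: str,
--     source_type: str,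
--     source_url: str,
--     content: str,
--     product_name: str = '',
--     update_type: str = '',
--     doc_links: list = None
-- ) -> str:
--     """Declarative flag-table: one static list of (include?, block) rows,
--     filtered and joined with blank-line separators."""
--     links = doc_links or []
--     table = [
--         (True, "# " + title),
--         (True, "**发布时间:** " + publish_date),
--         (True, "**厂商:** " + vendor.upper()),
--         (bool(product_name), "**产品:** " + product_name),
--         (True, "**类型:** " + (update_type or source_type.upper())),
--         (True, "**原始链接:** " + source_url),
--         (True, "---"),
--         (True, content),
--         (bool(links), "## 相关文档"),
--         (bool(links), "\n".join(
--             "- [%s](%s)" % (d.get('text', 'Link'), d.get('url', '')) for d in links)),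
--     ]
--     return "\n\n".join(text for keep, text in table if keep)
-- ===== Notes on version B (the rewrite author's own statement) =====
-- stated objective: simpler
-- what changed: B replaces A's imperative line-list construction (conditional extends with explicit "" separator lines, '\n' join) by one declarative static table of (include-flag, paragraph-block) rows that is filtered and joined with '\n\n'.
import Mathlib
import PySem

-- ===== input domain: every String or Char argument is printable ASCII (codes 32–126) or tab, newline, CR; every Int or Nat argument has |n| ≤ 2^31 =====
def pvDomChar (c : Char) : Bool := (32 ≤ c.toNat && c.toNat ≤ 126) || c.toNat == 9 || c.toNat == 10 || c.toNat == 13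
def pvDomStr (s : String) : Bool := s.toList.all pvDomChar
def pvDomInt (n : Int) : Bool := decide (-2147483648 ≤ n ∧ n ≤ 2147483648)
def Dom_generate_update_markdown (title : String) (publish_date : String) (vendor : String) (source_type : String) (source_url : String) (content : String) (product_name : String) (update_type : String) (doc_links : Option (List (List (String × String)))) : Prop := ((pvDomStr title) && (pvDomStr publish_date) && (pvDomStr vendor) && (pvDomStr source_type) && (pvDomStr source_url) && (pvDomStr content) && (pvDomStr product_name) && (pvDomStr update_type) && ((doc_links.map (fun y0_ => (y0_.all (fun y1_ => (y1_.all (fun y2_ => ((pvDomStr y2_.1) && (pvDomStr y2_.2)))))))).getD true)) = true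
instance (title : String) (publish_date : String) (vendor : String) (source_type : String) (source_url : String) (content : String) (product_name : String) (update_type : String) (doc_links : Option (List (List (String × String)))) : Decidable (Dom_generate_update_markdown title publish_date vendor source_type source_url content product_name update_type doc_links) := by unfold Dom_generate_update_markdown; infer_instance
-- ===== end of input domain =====

-- B is a declarative flag-table (one static list of (include?, block) rows, filtered then "\n\n"-joined) instead of A's imperative conditional extends of a flat line list; objective: simpler.

-- dict.get(k, dflt) on an association list: first match, default otherwise (exact for Python's dict.get under the assoc-list convention)
def pvDictGet (d : List (String × String)) (k dflt : String) : String :=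
  match d.find? (fun p => p.1 == k) with
  | some p => p.2
  | none => dflt

-- the "- [{text}]({url})" item line (used by both ports, as in both Pythons)
def pvDocItem (d : List (String × String)) : String :=
  "- [" ++ pvDictGet d "text" "Link" ++ "](" ++ pvDictGet d "url" "" ++ ")"

-- ===== PORT A =====
def generate_update_markdown (title : String) (publish_date : String) (vendor : String) (source_type : String) (source_url : String) (content : String) (product_name : String) (update_type : String) (doc_links : Option (List (List (String × String)))) : String :=
  let lines : List String :=
    ["# " ++ title, "",
     "**发布时间:** " ++ publish_date, "",
     "**厂商:** " ++ PySem.Str.upper vendor, ""]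
  let lines := if product_name ≠ "" then lines ++ ["**产品:** " ++ product_name, ""] else lines
  let lines := if update_type ≠ "" then lines ++ ["**类型:** " ++ update_type, ""]
               else lines ++ ["**类型:** " ++ PySem.Str.upper source_type, ""]
  let lines := lines ++ ["**原始链接:** " ++ source_url, "", "---", "", content]
  let lines := match doc_links with
    | some ds =>
        if ds.isEmpty then lines
        else ds.foldl (fun acc d => acc ++ [pvDocItem d]) (lines ++ ["", "## 相关文档", ""])
    | none => lines
  PySem.Str.join "\n" lines

-- ===== PORT B =====
def generate_update_markdown_alt (title : String) (publish_date : String) (vendor : String) (source_type : String) (source_url : String) (content : String) (product_name : String) (update_type : String) (doc_links : Option (List (List (String × String)))) : String :=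
  let links := doc_links.getD []
  let table : List (Bool × String) :=
    [(true, "# " ++ title),
     (true, "**发布时间:** " ++ publish_date),
     (true, "**厂商:** " ++ PySem.Str.upper vendor),
     (product_name ≠ "", "**产品:** " ++ product_name),
     (true, "**类型:** " ++ (if update_type ≠ "" then update_type else PySem.Str.upper source_type)),
     (true, "**原始链接:** " ++ source_url),
     (true, "---"),
     (true, content),
     (!links.isEmpty, "## 相关文档"),
     (!links.isEmpty, PySem.Str.join "\n" (links.map pvDocItem))]
  PySem.Str.join "\n\n" ((table.filter (·.1)).map (·.2))

-- ===== PRECONDITION & SPEC =====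
def Spec_generate_update_markdown (title : String) (publish_date : String) (vendor : String) (source_type : String) (source_url : String) (content : String) (product_name : String) (update_type : String) (doc_links : Option (List (List (String × String)))) (out : String) : Prop := out = generate_update_markdown_alt title publish_date vendor source_type source_url content product_name update_type doc_links
instance (title : String) (publish_date : String) (vendor : String) (source_type : String) (source_url : String) (content : String) (product_name : String) (update_type : String) (doc_links : Option (List (List (String × String)))) (out : String) : Decidable (Spec_generate_update_markdown title publish_date vendor source_type source_url content product_name update_type doc_links out) := by unfold Spec_generate_update_markdown; infer_instance

-- ===== CLAIM (what is proved, stated in full; the proofs are below) =====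
def Claim_equal_generate_update_markdown : Prop := ∀ (title : String) (publish_date : String) (vendor : String) (source_type : String) (source_url : String) (content : String) (product_name : String) (update_type : String) (doc_links : Option (List (List (String × String)))), Dom_generate_update_markdown title publish_date vendor source_type source_url content product_name update_type doc_links → Spec_generate_update_markdown title publish_date vendor source_type source_url content product_name update_type doc_links (generate_update_markdown title publish_date vendor source_type source_url content product_name update_type doc_links)

-- ===== LEMMAS AND PROOFS =====

-- join over a cons list as head plus sep-prefixed tail pieces
theorem pv_join_cons_eq (sep a : List Char) (rest : List (List Char)) :
    PySem.Chars.join sep (a :: rest) = a ++ rest.flatMap (fun x => sep ++ x) := by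
  induction rest generalizing a with
  | nil => simp [PySem.Chars.join_singleton]
  | cons b rs ih => simp [PySem.Chars.join_cons_cons, ih b, List.append_assoc]

theorem pv_foldl_items (ds : List (List (String × String))) (init : List String) :
    ds.foldl (fun acc d => acc ++ [pvDocItem d]) init = init ++ ds.map pvDocItem := by
  induction ds generalizing init with
  | nil => simp
  | cons d ds ih => simp [ih, List.append_assoc]

-- ===== VERDICT (by name: the statement is the Claim_ definition above) =====
theorem generate_update_markdown_spec : Claim_equal_generate_update_markdown := by
  intro title publish_date vendor source_type source_url content product_name update_type doc_links _
  unfold Spec_generate_update_markdown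
  have h1 : "\n".toList = ['\n'] := by decide
  have h2 : "\n\n".toList = ['\n', '\n'] := by decide
  have h0 : "".toList = ([] : List Char) := by decide
  rw [← String.toList_inj]
  cases doc_links with
  | none =>
      simp only [generate_update_markdown, generate_update_markdown_alt, Option.getD]
      split_ifs <;>
        simp_all [PySem.Str.toList_join, h1, h2, h0, pv_join_cons_eq, List.filter, List.map]
  | some ds =>
      cases ds with
      | nil =>
          simp only [generate_update_markdown, generate_update_markdown_alt, Option.getD,
            List.isEmpty_nil, if_true]
          split_ifs <;>
            simp_all [PySem.Str.toList_join, h1, h2, h0, pv_join_cons_eq, List.filter, List.map]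
      | cons d ds' =>
          simp only [generate_update_markdown, generate_update_markdown_alt, Option.getD,
            List.isEmpty_cons, pv_foldl_items]
          split_ifs <;>
            simp_all [PySem.Str.toList_join, h1, h2, h0, pv_join_cons_eq, List.filter, List.map,
              List.flatMap_map, List.map_map]
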